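-- pv_equiv track=rewrite | github.com/vruyr/swoosh | repos/tools.py | gen_sort_index
-- ===== SOURCE A (Python) =====
-- def gen_sort_index(values, sort_order):
-- 	sort_order_dict = dict((e, i) for i, e in enumerate(sort_order))
-- 	sort_index = list(range(len(values)))
-- 	num_sorted = len(sort_order)
-- 	def sortkey(i):
-- 		column = values[i]
-- 		return (sort_order_dict.get(column, num_sorted), column)
-- 	return sorted(sort_index, key=sortkey)
-- ===== SOURCE B (Python) =====
-- def gen_sort_index(values, sort_order):
-- 	rank = {}
-- 	for i, e in enumerate(sort_order):
-- 		rank[e] = i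
-- 	n = len(sort_order)
-- 	buckets = [[] for _ in range(n + 1)]
-- 	for i, v in enumerate(values):
-- 		buckets[rank.get(v, n)].append(i)
-- 	result = []
-- 	for b in buckets:
-- 		b.sort(key=lambda i: values[i])
-- 		result.extend(b)
-- 	return result
-- ===== Notes on version B (the rewrite author's own statement) =====
-- stated objective: alternative
-- what changed: Replaces the single global sort with a (rank,value) tuple key by a bucket pass: indices are distributed into num_sorted+1 rank buckets in one scan, then each bucket is stably sorted by the column value alone and the buckets are concatenated in rank order.
import Mathlib
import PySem

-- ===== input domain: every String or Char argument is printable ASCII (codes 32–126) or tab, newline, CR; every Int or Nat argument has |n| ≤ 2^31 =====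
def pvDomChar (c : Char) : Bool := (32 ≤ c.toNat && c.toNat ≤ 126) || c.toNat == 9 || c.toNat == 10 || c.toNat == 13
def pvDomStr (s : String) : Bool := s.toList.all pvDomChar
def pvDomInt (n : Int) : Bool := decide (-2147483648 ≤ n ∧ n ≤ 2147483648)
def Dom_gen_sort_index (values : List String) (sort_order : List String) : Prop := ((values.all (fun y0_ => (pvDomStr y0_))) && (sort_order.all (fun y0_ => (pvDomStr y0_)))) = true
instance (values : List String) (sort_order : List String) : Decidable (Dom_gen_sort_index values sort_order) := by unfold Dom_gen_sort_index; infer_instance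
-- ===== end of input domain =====

-- B replaces the global tuple-key sort by distribute-into-rank-buckets, then a stable
-- per-bucket sort by the column value, concatenated in rank order (alternative decomposition).


-- ===== PORT A =====
-- sortkey's values[i] is only evaluated at i ∈ range(len(values)), always in range,
-- so pyGetD with an unused default "" is exact there.
def gen_sort_index (values : List String) (sort_order : List String) : List Int :=
  let sort_order_dict : PySem.Dict String Int :=
    (PySem.List.enumerate sort_order).foldl (fun d p => d.insert p.2 p.1) PySem.Dict.empty
  let sort_index : List Int := PySem.List.pyRange 0 (PySem.List.len values) 1
  let num_sorted : Int := PySem.List.len sort_order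
  PySem.List.sorted2 sort_index
    (fun i => sort_order_dict.getD (PySem.List.pyGetD values i "") num_sorted)
    (fun i => PySem.List.pyGetD values i "") false

-- ===== PORT B =====
-- rank.get(v, n) is always in 0..n (enumerate indices or the default n), so the
-- bucket update 'buckets[r].append(i)' is exactly 'set r.toNat' with a List.getD read;
-- per-bucket 'b.sort(key=...)' only reads values[i] at in-range i (unused default "").
def gen_sort_index_alt (values : List String) (sort_order : List String) : List Int :=
  let rank : PySem.Dict String Int :=
    (PySem.List.enumerate sort_order).foldl (fun d p => d.insert p.2 p.1) PySem.Dict.empty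
  let n : Int := PySem.List.len sort_order
  let buckets : List (List Int) := (PySem.List.pyRange 0 (n+1) 1).map (fun _ => [])
  let buckets := (PySem.List.enumerate values).foldl
    (fun bs p => bs.set (rank.getD p.2 n).toNat ((bs.getD (rank.getD p.2 n).toNat []) ++ [p.1])) buckets
  buckets.foldl (fun acc b => acc ++ PySem.List.sorted b (fun i => PySem.List.pyGetD values i "") false) []

-- ===== PRECONDITION & SPEC =====
def Spec_gen_sort_index (values : List String) (sort_order : List String) (out : List Int) : Prop := out = gen_sort_index_alt values sort_order
instance (values : List String) (sort_order : List String) (out : List Int) : Decidable (Spec_gen_sort_index values sort_order out) := by unfold Spec_gen_sort_index; infer_instance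

-- ===== CLAIM (what is proved, stated in full; the proofs are below) =====
def Claim_equal_gen_sort_index : Prop := ∀ (values : List String) (sort_order : List String), Dom_gen_sort_index values sort_order → Spec_gen_sort_index values sort_order (gen_sort_index values sort_order)

-- ===== LEMMAS AND PROOFS =====

lemma sorted2_append_singleton (l : List Int) (x : Int) (k1 : Int → Int) (k2 : Int → String) :
    PySem.List.sorted2 (l ++ [x]) k1 k2 false
      = PySem.List.insertBy
          (fun a b => decide (k1 a < k1 b) || (!decide (k1 b < k1 a) && decide (k2 a < k2 b)))
          x (PySem.List.sorted2 l k1 k2 false) := by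
  simp [PySem.List.sorted2, List.foldl_append]

lemma flatMap_congr' {α β : Type} (l : List α) (f g : α → List β) (h : ∀ x ∈ l, f x = g x) :
    l.flatMap f = l.flatMap g := by
  rw [List.flatMap_def, List.flatMap_def, List.map_congr_left h]

lemma sorted_append_singleton (b : List Int) (x : Int) (k2 : Int → String) :
    PySem.List.sorted (b ++ [x]) k2 false
      = PySem.List.insertBy (fun a b => decide (k2 a < k2 b)) x (PySem.List.sorted b k2 false) := by
  simp [PySem.List.sorted, List.foldl_append]

lemma insertBy_nil {α : Type} (bef : α → α → Bool) (x : α) :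
    PySem.List.insertBy bef x [] = [x] := rfl

lemma insertBy_cons {α : Type} (bef : α → α → Bool) (x y : α) (ys : List α) :
    PySem.List.insertBy bef x (y :: ys)
      = if bef x y then x :: y :: ys else y :: PySem.List.insertBy bef x ys := rfl

lemma insertBy_prefix {α : Type} (bef : α → α → Bool) (x : α) (p s : List α)
    (h : ∀ y ∈ p, bef x y = false) :
    PySem.List.insertBy bef x (p ++ s) = p ++ PySem.List.insertBy bef x s := by
  induction p with
  | nil => simp
  | cons y p ih =>
    simp only [List.cons_append, insertBy_cons, h y (by simp)]
    simp only [if_neg Bool.false_ne_true]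
    rw [ih (fun z hz => h z (by simp [hz]))]

lemma insertBy_seg {α : Type} (bef bef' : α → α → Bool) (x : α) (b s : List α)
    (hm : ∀ y ∈ b, bef x y = bef' x y) (hs : ∀ y ∈ s, bef x y = true) :
    PySem.List.insertBy bef x (b ++ s) = PySem.List.insertBy bef' x b ++ s := by
  induction b with
  | nil =>
    cases s with
    | nil => simp [insertBy_nil]
    | cons z s' => simp [insertBy_cons, hs z (by simp), insertBy_nil]
  | cons y b ih =>
    have hy := hm y (by simp)
    simp only [List.cons_append, insertBy_cons, hy]
    cases h : bef' x y with
    | true => simp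
    | false =>
      simp only [if_neg Bool.false_ne_true]
      rw [ih (fun z hz => hm z (by simp [hz])) ]
      simp

lemma getD_foldl_insert_P (P : Int → Prop) (l : List (Int × String))
    (d : PySem.Dict String Int) (v : String) (dflt : Int)
    (hl : ∀ p ∈ l, P p.1) (hd : P (d.getD v dflt)) :
    P ((l.foldl (fun d p => d.insert p.2 p.1) d).getD v dflt) := by
  induction l generalizing d with
  | nil => simpa using hd
  | cons p l ih =>
    simp only [List.foldl_cons]
    refine ih _ (fun q hq => hl q (by simp [hq])) ?_
    rw [PySem.Dict.getD_insert]
    split_ifs with h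
    · exact hl p (by simp)
    · exact hd

-- every rank lookup (default included) lands in [0, n]
lemma rank_bound (sort_order : List String) (v : String) :
    0 ≤ ((PySem.List.enumerate sort_order).foldl
          (fun d p => d.insert p.2 p.1) PySem.Dict.empty).getD v (sort_order.length : Int)
    ∧ ((PySem.List.enumerate sort_order).foldl
          (fun d p => d.insert p.2 p.1) PySem.Dict.empty).getD v (sort_order.length : Int)
        ≤ (sort_order.length : Int) := by
  apply getD_foldl_insert_P (fun m => 0 ≤ m ∧ m ≤ (sort_order.length : Int))
  · intro p hp
    rcases (PySem.List.mem_enumerate_iff _ _ _).1 hp with ⟨k, hk, rfl⟩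
    refine ⟨by simp, ?_⟩
    simp
    omega
  · constructor
    · simp [PySem.Dict.getD, PySem.Dict.get?, PySem.Dict.empty]
    · simp [PySem.Dict.getD, PySem.Dict.get?, PySem.Dict.empty]

lemma set_map_range {α : Type} (m r : Nat) (g : Nat → α) (v : α) :
    ((List.range m).map g).set r v = (List.range m).map (fun j => if j = r then v else g j) := by
  apply List.ext_getElem
  · simp
  · intro i h1 h2
    simp only [List.length_set, List.length_map, List.length_range] at h1
    rw [List.getElem_set]
    simp only [List.getElem_map, List.getElem_range]
    split_ifs with h h'
    · rfl
    · omega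
    · omega
    · rfl

lemma getD_map_range' {α : Type} (m r : Nat) (hr : r < m) (g : Nat → α) (d : α) :
    ((List.range m).map g).getD r d = g r := by
  rw [List.getD_eq_getElem?_getD]
  simp [hr]

lemma distribute_eq (n : Nat) (k1 : Int → Int) (hb : ∀ x, 0 ≤ k1 x ∧ k1 x ≤ (n : Int))
    (l : List Int) (g : Nat → List Int) :
    l.foldl (fun bs x => bs.set (k1 x).toNat ((bs.getD (k1 x).toNat []) ++ [x]))
        ((List.range (n+1)).map g)
      = (List.range (n+1)).map (fun j => g j ++ l.filter (fun x => (k1 x).toNat == j)) := by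
  induction l generalizing g with
  | nil => simp
  | cons x l ih =>
    have hr : (k1 x).toNat < n + 1 := by have := hb x; omega
    simp only [List.foldl_cons]
    rw [getD_map_range' _ _ hr, set_map_range]
    rw [ih]
    apply List.map_congr_left
    intro j hj
    by_cases h : j = (k1 x).toNat
    · subst h
      simp
    · have : ((k1 x).toNat == j) = false := by simp [Ne.symm h]
      simp [this, h]

-- membership in a sorted bucket pins the rank
lemma mem_bucket_rank (k1 : Int → Int) (k2 : Int → String) (l : List Int) (j : Nat) (y : Int)
    (hy : y ∈ PySem.List.sorted (l.filter (fun x => (k1 x).toNat == j)) k2 false) :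
    (k1 y).toNat = j := by
  have := (PySem.List.mem_sorted _ _ _ _).1 hy
  have := (List.mem_filter.1 this).2
  simpa using this

-- A's tuple-key sort is the concatenation, in rank order, of the per-rank stable sorts
lemma sorted2_eq_flatMap (n : Nat) (k1 : Int → Int) (k2 : Int → String)
    (hb : ∀ x, 0 ≤ k1 x ∧ k1 x ≤ (n : Int)) (l : List Int) :
    PySem.List.sorted2 l k1 k2 false
      = (List.range (n+1)).flatMap
          (fun j => PySem.List.sorted (l.filter (fun x => (k1 x).toNat == j)) k2 false) := by
  induction l using List.reverseRecOn with
  | nil => simp [PySem.List.sorted2, PySem.List.sorted]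
  | append_singleton l x ih =>
    have hbx := hb x
    set r : Nat := (k1 x).toNat with hrdef
    have hrn : r ≤ n := by omega
    -- split the bucket-index range at r
    have hsplit : List.range (n+1)
        = List.range r ++ [r] ++ (List.range (n - r)).map (fun t => r + 1 + t) := by
      have h1 : List.range (n+1) = List.range ((r+1) + (n - r)) := by congr 1; omega
      rw [h1, List.range_add, List.range_succ]
    rw [sorted2_append_singleton, ih, hsplit]
    simp only [List.flatMap_append, List.flatMap_cons, List.flatMap_nil, List.append_nil,
      List.flatMap_map]
    -- the new element only changes bucket r
    have hfilter_ne : ∀ j : Nat, j ≠ r →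
        (l ++ [x]).filter (fun z => (k1 z).toNat == j) = l.filter (fun z => (k1 z).toNat == j) := by
      intro j hj
      rw [List.filter_append]
      have : ((k1 x).toNat == j) = false := by simp [← hrdef]; omega
      simp [this]
    have hfilter_r :
        (l ++ [x]).filter (fun z => (k1 z).toNat == r) = l.filter (fun z => (k1 z).toNat == r) ++ [x] := by
      rw [List.filter_append]
      have : ((k1 x).toNat == r) = true := by simp [← hrdef]
      simp [this]
    -- rewrite the three segments of the target
    rw [show ((List.range r).flatMap
          (fun j => PySem.List.sorted ((l ++ [x]).filter (fun z => (k1 z).toNat == j)) k2 false))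
        = ((List.range r).flatMap
          (fun j => PySem.List.sorted (l.filter (fun z => (k1 z).toNat == j)) k2 false)) from by
      apply flatMap_congr'
      intro j hj
      rw [hfilter_ne j (by have := List.mem_range.1 hj; omega)]]
    rw [show ((List.range (n - r)).flatMap
          (fun t => PySem.List.sorted ((l ++ [x]).filter (fun z => (k1 z).toNat == (r + 1 + t))) k2 false))
        = ((List.range (n - r)).flatMap
          (fun t => PySem.List.sorted (l.filter (fun z => (k1 z).toNat == (r + 1 + t))) k2 false)) from by
      apply flatMap_congr'
      intro t ht
      rw [hfilter_ne (r + 1 + t) (by omega)]]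
    rw [hfilter_r, sorted_append_singleton]
    -- now insert x: skip the low buckets, act like the k2-insert inside bucket r, stop at the high ones
    rw [List.append_assoc]
    rw [insertBy_prefix _ x _ _ ?hlow]
    case hlow =>
      intro y hy
      rcases List.mem_flatMap.1 hy with ⟨j, hj, hyj⟩
      have hjr : j < r := List.mem_range.1 hj
      have hyrank := mem_bucket_rank k1 k2 l j y hyj
      have hy0 := (hb y).1
      have h1 : ¬ k1 x < k1 y := by omega
      have h2 : k1 y < k1 x := by omega
      simp [h1, h2]
    rw [insertBy_seg _ (fun a b => decide (k2 a < k2 b)) x _ _ ?hmid ?hhigh]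
    case hmid =>
      intro y hy
      have hyrank := mem_bucket_rank k1 k2 l r y hy
      have hy0 := (hb y).1
      have heq : k1 y = k1 x := by omega
      simp [heq]
    case hhigh =>
      intro y hy
      rcases List.mem_flatMap.1 hy with ⟨t, ht, hyt⟩
      have hyrank := mem_bucket_rank k1 k2 l (r + 1 + t) y hyt
      have h1 : k1 x < k1 y := by omega
      simp [h1]
    simp [List.append_assoc]

-- ===== VERDICT (by name: the statement is the Claim_ definition above) =====
theorem gen_sort_index_spec : Claim_equal_gen_sort_index := by
  intro values sort_order _
  unfold Spec_gen_sort_index gen_sort_index gen_sort_index_alt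
  simp only []
  set d : PySem.Dict String Int :=
    (PySem.List.enumerate sort_order).foldl (fun d p => d.insert p.2 p.1) PySem.Dict.empty with hd
  set n : Nat := sort_order.length with hn
  set k2 : Int → String := fun i => PySem.List.pyGetD values i "" with hk2
  set k1 : Int → Int := fun i => d.getD (k2 i) (n : Int) with hk1
  have hb : ∀ x, 0 ≤ k1 x ∧ k1 x ≤ (n : Int) := fun x => rank_bound sort_order (k2 x)
  -- B side: enumerate values is range(len(values)) paired with values[j]
  rw [PySem.List.enumerate_eq_map_pyRange (d := ""), List.foldl_map]
  have hlen : PySem.List.len values = ((values.length : Nat) : Int) := by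
    simp [PySem.List.len_eq]
  have hlen2 : PySem.List.len sort_order = ((n : Nat) : Int) := by
    simp [PySem.List.len_eq, hn]
  rw [hlen, hlen2]
  have hbuckets0 : (PySem.List.pyRange 0 (((n : Nat) : Int) + 1) 1).map (fun _ => ([] : List Int))
      = (List.range (n+1)).map (fun _ => ([] : List Int)) := by
    have : ((n : Nat) : Int) + 1 = ((n + 1 : Nat) : Int) := by push_cast; ring
    rw [this, PySem.List.pyRange_zero_natCast, List.map_map]
    simp [Function.comp_def]
  rw [hbuckets0]
  rw [distribute_eq n k1 hb _ (fun _ => [])]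
  rw [PySem.List.foldl_append_eq_flatMap]
  rw [List.flatMap_map]
  simp only [List.nil_append]
  exact sorted2_eq_flatMap n k1 k2 hb _
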